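-- pv_equiv track=rewrite | github.com/black-magic-studios/math-sdk | games/0_0_alchemy/optimize_reel_placement.py | analyze_reel_windows
-- ===== SOURCE A (Python) =====
-- from collections import defaultdict
-- from typing import List, Dict, Tuple
--
-- NUM_ROWS = 7
--
-- HIGH_VALUE = ['H1', 'H2', 'W']
--
-- FEATURES = ['P', 'B', 'T']
--
-- def get_window(reel: List[str], start: int) -> List[str]:
--     """Get 7 consecutive symbols from a reel (with wrap-around)."""
--     return [reel[(start + i) % len(reel)] for i in range(NUM_ROWS)]
--
-- def count_adjacency_in_window(window: List[str]) -> Dict[str, int]: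
--     """Count vertical adjacency pairs in a 7-symbol window."""
--     pairs = defaultdict(int)
--     for i in range(len(window) - 1):
--         if window[i] == window[i + 1]:
--             pairs[window[i]] += 1
--         # Also count wild adjacency to any symbol
--         if window[i] == 'W' or window[i + 1] == 'W':
--             if window[i] != window[i + 1]:
--                 pairs['W_adj'] += 1
--     return pairs
--
-- def analyze_reel_windows(reel: List[str]) -> Dict:
--     """Analyze all possible windows on a reel."""
--     stats = {
--         'total_windows': len(reel),
--         'windows_with_pairs': 0,
--         'high_value_pairs': 0,
--         'wild_adjacent_to_symbol': 0,
--         'feature_isolated': 0,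
--         'feature_with_matches': 0,
--     }
--
--     for start in range(len(reel)):
--         window = get_window(reel, start)
--         pairs = count_adjacency_in_window(window)
--
--         if sum(pairs.values()) > 0:
--             stats['windows_with_pairs'] += 1
--
--         for sym in HIGH_VALUE:
--             stats['high_value_pairs'] += pairs.get(sym, 0)
--
--         stats['wild_adjacent_to_symbol'] += pairs.get('W_adj', 0)
--
--         # Check if features are isolated (no matching neighbors)
--         for i, sym in enumerate(window):
--             if sym in FEATURES:
--                 neighbors = []
--                 if i > 0:
--                     neighbors.append(window[i-1])
--                 if i < len(window) - 1:
--                     neighbors.append(window[i+1])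
--
--                 # Feature is "good" if neighbors are all different from each other
--                 if len(neighbors) == 2 and neighbors[0] != neighbors[1]:
--                     stats['feature_isolated'] += 1
--                 else:
--                     stats['feature_with_matches'] += 1
--
--     return stats
-- ===== SOURCE B (Python) =====
-- def analyze_reel_windows(reel):
--     """Analyze all possible windows on a reel (edge/position aggregation, no window rebuilding)."""
--     n = len(reel)
--     stats = {
--         'total_windows': n,
--         'windows_with_pairs': 0,
--         'high_value_pairs': 0,
--         'wild_adjacent_to_symbol': 0,
--         'feature_isolated': 0,
--         'feature_with_matches': 0,
--     }
--     if n == 0: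
--         return stats
--
--     eq = [reel[p] == reel[(p + 1) % n] for p in range(n)]
--     wild = [not eq[p] and 'W' in (reel[p], reel[(p + 1) % n]) for p in range(n)]
--     active = [eq[p] or wild[p] for p in range(n)]
--     feat = [p for p in range(n) if reel[p] in ('P', 'B', 'T')]
--
--     # each reel edge occurs in exactly 6 window-edge slots over all n windows
--     stats['high_value_pairs'] = 6 * sum(
--         1 for p in range(n) if eq[p] and reel[p] in ('H1', 'H2', 'W'))
--     stats['wild_adjacent_to_symbol'] = 6 * sum(1 for p in range(n) if wild[p])
--     # each feature position: 5 interior window slots (2 neighbours) + 2 endpoint slots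
--     iso = sum(1 for p in feat if reel[(p - 1) % n] != reel[(p + 1) % n])
--     stats['feature_isolated'] = 5 * iso
--     stats['feature_with_matches'] = 5 * (len(feat) - iso) + 2 * len(feat)
--     stats['windows_with_pairs'] = sum(
--         1 for s in range(n) if any(active[(s + j) % n] for j in range(6)))
--     return stats
-- ===== Notes on version B (the rewrite author's own statement) =====
-- stated objective: faster
-- what changed: B computes each statistic by one aggregation pass over reel edges/positions (each reel edge occurs in exactly 6 window-edge slots, each reel position in 5 interior + 2 endpoint window slots) plus one existence scan for windows_with_pairs, instead of rebuilding and rescanning every 7-symbol window with a per-window defaultdict.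
-- intended difference: On reels with a circularly adjacent equal pair of the literal symbol 'W_adj', A returns wild_adjacent_to_symbol inflated by 6 per such pair (the reel symbol collides with A's internal 'W_adj' sentinel dict key), while B returns the true wild-adjacency count, which is the intended value. — e.g. on analyze_reel_windows(["W_adj", "W_adj"]): A returns [("total_windows", 2), ("windows_with_pairs", 2), ("high_value_pairs", 0), ("wild_adjacent_to_symbol", 12), ("feature_i…, B returns [("total_windows", 2), ("windows_with_pairs", 2), ("high_value_pairs", 0), ("wild_adjacent_to_symbol", 0), ("feature_is…
import Mathlib
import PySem

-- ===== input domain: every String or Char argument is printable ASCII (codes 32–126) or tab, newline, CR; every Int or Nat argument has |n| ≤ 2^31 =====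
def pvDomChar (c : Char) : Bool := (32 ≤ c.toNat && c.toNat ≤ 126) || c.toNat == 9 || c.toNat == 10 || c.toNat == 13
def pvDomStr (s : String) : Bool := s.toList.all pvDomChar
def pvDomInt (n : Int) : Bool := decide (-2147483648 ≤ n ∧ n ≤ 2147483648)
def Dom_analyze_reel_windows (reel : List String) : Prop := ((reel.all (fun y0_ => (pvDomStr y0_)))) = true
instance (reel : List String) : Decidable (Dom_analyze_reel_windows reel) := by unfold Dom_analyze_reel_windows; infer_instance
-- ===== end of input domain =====

-- B aggregates the window statistics once per reel edge / reel position (each reel edge sits in exactly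
-- 6 window-edge slots, each reel position in 5 interior and 2 endpoint window slots) instead of rebuilding
-- and rescanning all n 7-symbol windows; same return value except on the stated D_ region.

-- ===== PORT A =====
def pvHIGH_VALUE : List String := ["H1", "H2", "W"]
def pvFEATURES : List String := ["P", "B", "T"]

-- reel[(start + i) % len(reel)]; the pyGetD default "" is never used: the index is in range whenever
-- this is called (analyze_reel_windows only calls it with a nonempty reel).
def get_window (reel : List String) (start : Int) : List String :=
  (PySem.List.pyRange 0 7 1).map (fun i =>
    PySem.List.pyGetD reel (PySem.Int.mod (start + i) (reel.length : Int)) "")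

-- loop body of count_adjacency_in_window (pairs is a defaultdict(int): pairs[k] += 1 is modify k 0 (+1))
def caw_step (window : List String) (pairs : PySem.Dict String Int) (i : Int) : PySem.Dict String Int :=
  let wi := PySem.List.pyGetD window i ""
  let wi1 := PySem.List.pyGetD window (i + 1) ""
  let pairs1 := if wi == wi1 then pairs.modify wi 0 (· + 1) else pairs
  if (wi == "W" || wi1 == "W") && !(wi == wi1) then pairs1.modify "W_adj" 0 (· + 1) else pairs1

def count_adjacency_in_window (window : List String) : PySem.Dict String Int :=
  (PySem.List.pyRange 0 ((window.length : Int) - 1) 1).foldl (caw_step window) PySem.Dict.empty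

-- loop body of the 'for i, sym in enumerate(window)' feature scan
-- (stats['k'] += 1 on a key that is always present is modify k 0 (+1))
def feat_step (window : List String) (stats : PySem.Dict String Int) (p : Int × String) :
    PySem.Dict String Int :=
  if pvFEATURES.contains p.2 then
    let neighbors : List String :=
      (if p.1 > 0 then [PySem.List.pyGetD window (p.1 - 1) ""] else []) ++
      (if p.1 < (window.length : Int) - 1 then [PySem.List.pyGetD window (p.1 + 1) ""] else [])
    if neighbors.length == 2 &&
        !(PySem.List.pyGetD neighbors 0 "" == PySem.List.pyGetD neighbors 1 "") then
      stats.modify "feature_isolated" 0 (· + 1)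
    else
      stats.modify "feature_with_matches" 0 (· + 1)
  else stats

def arw_step (reel : List String) (stats : PySem.Dict String Int) (start : Int) :
    PySem.Dict String Int :=
  let window := get_window reel start
  let pairs := count_adjacency_in_window window
  let stats1 := if pairs.values.sum > 0 then stats.modify "windows_with_pairs" 0 (· + 1) else stats
  let stats2 := pvHIGH_VALUE.foldl (fun st sym => st.modify "high_value_pairs" 0 (· + pairs.getD sym 0)) stats1
  let stats3 := stats2.modify "wild_adjacent_to_symbol" 0 (· + pairs.getD "W_adj" 0)
  (PySem.List.enumerate window 0).foldl (feat_step window) stats3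

def analyze_reel_windows (reel : List String) : List (String × Int) :=
  let stats0 : PySem.Dict String Int := PySem.Dict.ofList
    [("total_windows", (reel.length : Int)), ("windows_with_pairs", 0), ("high_value_pairs", 0),
     ("wild_adjacent_to_symbol", 0), ("feature_isolated", 0), ("feature_with_matches", 0)]
  ((PySem.List.pyRange 0 (reel.length : Int) 1).foldl (arw_step reel) stats0).items

-- ===== PORT B =====
def analyze_reel_windows_alt (reel : List String) : List (String × Int) :=
  let n : Int := (reel.length : Int)
  let stats0 : PySem.Dict String Int := PySem.Dict.ofList
    [("total_windows", n), ("windows_with_pairs", 0), ("high_value_pairs", 0),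
     ("wild_adjacent_to_symbol", 0), ("feature_isolated", 0), ("feature_with_matches", 0)]
  if n == 0 then stats0.items else
  let rng := PySem.List.pyRange 0 n 1
  let eqL : List Bool := rng.map (fun p =>
    PySem.List.pyGetD reel p "" == PySem.List.pyGetD reel (PySem.Int.mod (p + 1) n) "")
  let wildL : List Bool := rng.map (fun p =>
    !(PySem.List.pyGetD eqL p false) &&
      (PySem.List.pyGetD reel p "" == "W" || PySem.List.pyGetD reel (PySem.Int.mod (p + 1) n) "" == "W"))
  let activeL : List Bool := rng.map (fun p =>
    PySem.List.pyGetD eqL p false || PySem.List.pyGetD wildL p false)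
  let featL : List Int := rng.filter (fun p => ["P", "B", "T"].contains (PySem.List.pyGetD reel p ""))
  let hv : Int := 6 * (rng.countP (fun p =>
    PySem.List.pyGetD eqL p false && ["H1", "H2", "W"].contains (PySem.List.pyGetD reel p "")) : Int)
  let wa : Int := 6 * (rng.countP (fun p => PySem.List.pyGetD wildL p false) : Int)
  let iso : Int := (featL.countP (fun p =>
    !(PySem.List.pyGetD reel (PySem.Int.mod (p - 1) n) "" ==
      PySem.List.pyGetD reel (PySem.Int.mod (p + 1) n) "")) : Int)
  let fi : Int := 5 * iso
  let fm : Int := 5 * ((featL.length : Int) - iso) + 2 * (featL.length : Int)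
  let wp : Int := (rng.countP (fun s => (PySem.List.pyRange 0 6 1).any (fun j =>
    PySem.List.pyGetD activeL (PySem.Int.mod (s + j) n) false)) : Int)
  (((((stats0.insert "high_value_pairs" hv).insert "wild_adjacent_to_symbol" wa).insert
      "feature_isolated" fi).insert "feature_with_matches" fm).insert "windows_with_pairs" wp).items

-- ===== PRECONDITION & SPEC =====
-- On reels containing a circularly adjacent equal pair of the literal symbol 'W_adj', A's
-- 'wild_adjacent_to_symbol' is inflated by 6 per such pair because that reel symbol collides with the
-- internal sentinel key 'W_adj' of its pairs dictionary; B returns the actual wild-adjacency count,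
-- which is the intended value.
def D_analyze_reel_windows (reel : List String) : Prop :=
  ∃ p ∈ List.range reel.length,
    reel.getD p "" = "W_adj" ∧ reel.getD ((p + 1) % reel.length) "" = "W_adj"
instance (reel : List String) : Decidable (D_analyze_reel_windows reel) := by
  unfold D_analyze_reel_windows; infer_instance

def Spec_analyze_reel_windows (reel : List String) (out : List (String × Int)) : Prop :=
  ¬ D_analyze_reel_windows reel → out = analyze_reel_windows_alt reel
instance (reel : List String) (out : List (String × Int)) : Decidable (Spec_analyze_reel_windows reel out) := by
  unfold Spec_analyze_reel_windows; infer_instance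

def pvDiffWitness_analyze_reel_windows : List String := ["W_adj", "W_adj"]
def pvDiffWitnessOut_analyze_reel_windows : (List (String × Int)) × (List (String × Int)) :=
  ([("total_windows", 2), ("windows_with_pairs", 2), ("high_value_pairs", 0),
    ("wild_adjacent_to_symbol", 12), ("feature_isolated", 0), ("feature_with_matches", 0)],
   [("total_windows", 2), ("windows_with_pairs", 2), ("high_value_pairs", 0),
    ("wild_adjacent_to_symbol", 0), ("feature_isolated", 0), ("feature_with_matches", 0)])

-- ===== CLAIM (what is proved, stated in full; the proofs are below) =====
def Claim_unchanged_analyze_reel_windows : Prop := ∀ (reel : List String),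
  Dom_analyze_reel_windows reel → Spec_analyze_reel_windows reel (analyze_reel_windows reel)
def Claim_changed_analyze_reel_windows : Prop :=
  Dom_analyze_reel_windows (pvDiffWitness_analyze_reel_windows) ∧
  D_analyze_reel_windows (pvDiffWitness_analyze_reel_windows) ∧
  analyze_reel_windows (pvDiffWitness_analyze_reel_windows) = pvDiffWitnessOut_analyze_reel_windows.1 ∧
  analyze_reel_windows_alt (pvDiffWitness_analyze_reel_windows) = pvDiffWitnessOut_analyze_reel_windows.2 ∧
  pvDiffWitnessOut_analyze_reel_windows.1 ≠ pvDiffWitnessOut_analyze_reel_windows.2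
def Claim_exact_analyze_reel_windows : Prop := ∀ (reel : List String),
  Dom_analyze_reel_windows reel → D_analyze_reel_windows reel →
  analyze_reel_windows reel ≠ analyze_reel_windows_alt reel


-- ===== LEMMAS AND PROOFS =====
def rAt (reel : List String) (p : Nat) : String := reel.getD (p % reel.length) ""
def incK (reel : List String) (q : Nat) : Option String :=
  if rAt reel q = rAt reel (q + 1) then some (rAt reel q)
  else if rAt reel q = "W" ∨ rAt reel (q + 1) = "W" then some "W_adj" else none
def iteI (c : Prop) [Decidable c] : Int := if c then 1 else 0
def cnt (n : Nat) (g : Nat → Int) : Int := ((List.range n).map g).sum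
def gK (reel : List String) (k : String) (q : Nat) : Int := iteI (incK reel q = some k)
def gAct (reel : List String) (q : Nat) : Int := iteI (incK reel q ≠ none)
def gF (reel : List String) (q : Nat) : Int := iteI (rAt reel q ∈ pvFEATURES)
def gIso (reel : List String) (q : Nat) : Int :=
  iteI (rAt reel (q + 1) ∈ pvFEATURES ∧ rAt reel q ≠ rAt reel (q + 2))
def gMat (reel : List String) (q : Nat) : Int :=
  iteI (rAt reel (q + 1) ∈ pvFEATURES ∧ rAt reel q = rAt reel (q + 2))
def winSum6 (s : Nat) (g : Nat → Int) : Int := ((List.range 6).map (fun i => g (s + i))).sum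
def winSum5 (s : Nat) (g : Nat → Int) : Int := ((List.range 5).map (fun i => g (s + i))).sum
def mk6 (t wp hv wa fi fm : Int) : PySem.Dict String Int := PySem.Dict.ofList
  [("total_windows", t), ("windows_with_pairs", wp), ("high_value_pairs", hv),
   ("wild_adjacent_to_symbol", wa), ("feature_isolated", fi), ("feature_with_matches", fm)]
def inc2 (wf : Nat → String) (i : Nat) : Option String :=
  if wf i = wf (i + 1) then some (wf i)
  else if wf i = "W" ∨ wf (i + 1) = "W" then some "W_adj" else none

theorem gw_elem (reel : List String) (s j : Nat) :
    PySem.List.pyGetD reel (PySem.Int.mod ((s : Int) + (j : Nat)) (reel.length : Int)) "" = rAt reel (s + j) := by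
  have h : ((s : Int) + (j : Nat)) = ((s + j : Nat) : Int) := by push_cast; ring
  rw [h, PySem.Int.mod_natCast, PySem.List.pyGetD_natCast]; rfl

theorem window_eq (reel : List String) (s : Nat) :
    get_window reel (s : Int) = (List.range 7).map (fun k => rAt reel (s + k)) := by
  have h7 : PySem.List.pyRange 0 7 1 =
      [((0:Nat):Int), ((1:Nat):Int), ((2:Nat):Int), ((3:Nat):Int), ((4:Nat):Int), ((5:Nat):Int), ((6:Nat):Int)] := by decide
  simp only [get_window, h7, List.map_cons, List.map_nil]
  rw [gw_elem, gw_elem, gw_elem, gw_elem, gw_elem, gw_elem, gw_elem]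
  simp [List.range_succ]

theorem caw_step_eq (wf : Nat → String) (d : PySem.Dict String Int) (i : Nat) (h : i + 1 < 7) :
    caw_step ((List.range 7).map wf) d (i : Int) =
      (match inc2 wf i with
       | some k => d.modify k 0 (· + 1)
       | none => d) := by
  have hi : PySem.List.pyGetD ((List.range 7).map wf) (i : Int) "" = wf i := by
    rw [PySem.List.pyGetD_natCast, PySem.List.getD_map_range _ _ _ _ (by omega)]
  have hi1 : PySem.List.pyGetD ((List.range 7).map wf) ((i : Int) + 1) "" = wf (i + 1) := by
    have h2 : ((i : Int) + 1) = ((i + 1 : Nat) : Int) := by push_cast; ring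
    rw [h2, PySem.List.pyGetD_natCast, PySem.List.getD_map_range _ _ _ _ (by omega)]
  simp only [caw_step, hi, hi1, inc2]
  by_cases he : wf i = wf (i + 1) <;> by_cases hw : wf i = "W" ∨ wf (i + 1) = "W" <;>
    simp [he, hw]

theorem pairs_eq_fold (wf : Nat → String) :
    count_adjacency_in_window ((List.range 7).map wf) =
      (List.range 6).foldl (fun (d : PySem.Dict String Int) (i : Nat) => caw_step ((List.range 7).map wf) d (i : Int)) PySem.Dict.empty := by
  have len : (((List.range 7).map wf).length : Int) - 1 = ((6 : Nat) : Int) := by simp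
  rw [count_adjacency_in_window, len, PySem.List.pyRange_zero_nat, List.foldl_map]

theorem fold_getD (wf : Nat → String) (l : List Nat) (hl : ∀ i ∈ l, i + 1 < 7)
    (d : PySem.Dict String Int) (k : String) :
    ((l.foldl (fun (d : PySem.Dict String Int) (i : Nat) => caw_step ((List.range 7).map wf) d (i : Int)) d).getD k 0) =
      d.getD k 0 + ((l.map (fun i => iteI (inc2 wf i = some k))).sum) := by
  induction l generalizing d with
  | nil => simp
  | cons a t ih =>
    simp only [List.foldl_cons, List.map_cons, List.sum_cons]
    rw [caw_step_eq wf d a (hl a (by simp))]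
    cases h : inc2 wf a with
    | none =>
      rw [ih (fun i hi => hl i (by simp [hi]))]
      simp [iteI, h]
    | some k' =>
      rw [ih (fun i hi => hl i (by simp [hi]))]
      rw [PySem.Dict.getD_modify]
      by_cases hk : k = k'
      · simp only [iteI, h, hk, if_pos rfl, Option.some.injEq]
        norm_num
        ring
      · rw [if_neg hk]
        simp only [iteI, h, Option.some.injEq]
        have : ¬ (k' = k) := fun hh => hk hh.symm
        simp [this]




theorem nodup_keys_modify {d : PySem.Dict String Int} (k : String) (d0 : Int) (f : Int → Int)
    (hd : d.keys.Nodup) : (d.modify k d0 f).keys.Nodup := by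
  rw [PySem.Dict.keys_modify]
  exact PySem.Dict.nodup_keys_insert _ _ _ hd

theorem fold_nodup (wf : Nat → String) (l : List Nat) (hl : ∀ i ∈ l, i + 1 < 7)
    (d : PySem.Dict String Int) (hd : d.keys.Nodup) :
    ((l.foldl (fun (d : PySem.Dict String Int) (i : Nat) => caw_step ((List.range 7).map wf) d (i : Int)) d)).keys.Nodup := by
  induction l generalizing d with
  | nil => simpa
  | cons a t ih =>
    simp only [List.foldl_cons]
    rw [caw_step_eq wf d a (hl a (by simp))]
    cases h : inc2 wf a with
    | none => exact ih (fun i hi => hl i (by simp [hi])) _ hd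
    | some k' => exact ih (fun i hi => hl i (by simp [hi])) _ (nodup_keys_modify _ _ _ hd)

theorem fold_all_none (wf : Nat → String) (l : List Nat) (hl : ∀ i ∈ l, i + 1 < 7)
    (hno : ∀ i ∈ l, inc2 wf i = none) (d : PySem.Dict String Int) :
    (l.foldl (fun (d : PySem.Dict String Int) (i : Nat) => caw_step ((List.range 7).map wf) d (i : Int)) d) = d := by
  induction l generalizing d with
  | nil => rfl
  | cons a t ih =>
    simp only [List.foldl_cons]
    rw [caw_step_eq wf d a (hl a (by simp)), hno a (by simp)]
    exact ih (fun i hi => hl i (by simp [hi])) (fun i hi => hno i (by simp [hi])) d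

theorem fold_valsum_pos (wf : Nat → String) (l : List Nat) (hl : ∀ i ∈ l, i + 1 < 7) :
    (0 < ((l.foldl (fun (d : PySem.Dict String Int) (i : Nat) => caw_step ((List.range 7).map wf) d (i : Int)) PySem.Dict.empty)).values.sum)
      ↔ ∃ i ∈ l, inc2 wf i ≠ none := by
  constructor
  · intro hpos
    by_contra hno
    push_neg at hno
    rw [fold_all_none wf l hl hno] at hpos
    simp [PySem.Dict.empty] at hpos
  · rintro ⟨i0, hi0, hnone⟩
    set D := (l.foldl (fun (d : PySem.Dict String Int) (i : Nat) => caw_step ((List.range 7).map wf) d (i : Int)) PySem.Dict.empty) with hD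
    have hnd : D.keys.Nodup := fold_nodup wf l hl _ PySem.Dict.nodup_keys_empty
    obtain ⟨k0, hk0⟩ : ∃ k0, inc2 wf i0 = some k0 := by
      cases h : inc2 wf i0 with
      | none => exact absurd h hnone
      | some k => exact ⟨k, rfl⟩
    have hgetD : ∀ k, D.getD k 0 = ((l.map (fun i => iteI (inc2 wf i = some k))).sum) := by
      intro k; rw [hD, fold_getD wf l hl, PySem.Dict.getD_empty]; ring
    have hnonneg : ∀ k, 0 ≤ D.getD k 0 := by
      intro k; rw [hgetD]
      apply List.sum_nonneg
      intro x hx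
      simp only [List.mem_map] at hx
      obtain ⟨i, _, rfl⟩ := hx
      unfold iteI; split <;> omega
    have hk0pos : 1 ≤ D.getD k0 0 := by
      rw [hgetD]
      have hmem : iteI (inc2 wf i0 = some k0) ∈ l.map (fun i => iteI (inc2 wf i = some k0)) :=
        List.mem_map_of_mem hi0
      have h1 : iteI (inc2 wf i0 = some k0) = 1 := by simp [iteI, hk0]
      calc (1:Int) = iteI (inc2 wf i0 = some k0) := h1.symm
        _ ≤ _ := List.single_le_sum (by
            intro x hx
            simp only [List.mem_map] at hx
            obtain ⟨i, _, rfl⟩ := hx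
            unfold iteI; split <;> omega) _ hmem
    have hcont : D.contains k0 = true := by
      by_cases hc : D.contains k0 = true
      · exact hc
      · have := PySem.Dict.getD_of_not_contains D (0:Int) (by simpa using hc)
        omega
    have hmemk : k0 ∈ D.keys := (PySem.Dict.contains_iff_mem_keys D k0).mp hcont
    have hvals : D.values = D.keys.map (fun k => D.getD k 0) := PySem.Dict.values_eq_map_keys D hnd 0
    have hvmem : D.getD k0 0 ∈ D.values := by rw [hvals]; exact List.mem_map_of_mem hmemk
    have hallnn : ∀ v ∈ D.values, (0:Int) ≤ v := by
      intro v hv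
      rw [hvals] at hv
      simp only [List.mem_map] at hv
      obtain ⟨k, _, rfl⟩ := hv
      exact hnonneg k
    have := List.single_le_sum hallnn _ hvmem
    omega

theorem mk6_wp_mod (t wp hv wa fi fm : Int) :
    (mk6 t wp hv wa fi fm).modify "windows_with_pairs" 0 (· + 1) = mk6 t (wp + 1) hv wa fi fm := rfl
theorem mk6_hv_mod (t wp hv wa fi fm v : Int) :
    (mk6 t wp hv wa fi fm).modify "high_value_pairs" 0 (· + v) = mk6 t wp (hv + v) wa fi fm := rfl
theorem mk6_wa_mod (t wp hv wa fi fm v : Int) :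
    (mk6 t wp hv wa fi fm).modify "wild_adjacent_to_symbol" 0 (· + v) = mk6 t wp hv (wa + v) fi fm := rfl
theorem mk6_fi_mod (t wp hv wa fi fm : Int) :
    (mk6 t wp hv wa fi fm).modify "feature_isolated" 0 (· + 1) = mk6 t wp hv wa (fi + 1) fm := rfl
theorem mk6_fm_mod (t wp hv wa fi fm : Int) :
    (mk6 t wp hv wa fi fm).modify "feature_with_matches" 0 (· + 1) = mk6 t wp hv wa fi (fm + 1) := rfl

theorem sum_iteI_eq_countP {α : Type} (l : List α) (c : α → Prop) [DecidablePred c] :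
    (l.map (fun x => iteI (c x))).sum = (l.countP (fun x => decide (c x)) : Int) := by
  have := PySem.List.sum_map_ite_one_zero (fun x => decide (c x)) l
  simpa [iteI] using this

theorem pyGetD_pair0 (a b : String) : PySem.List.pyGetD [a, b] 0 "" = a := by
  rw [show (0:Int) = ((0:Nat):Int) from rfl, PySem.List.pyGetD_natCast]; rfl
theorem pyGetD_pair1 (a b : String) : PySem.List.pyGetD [a, b] 1 "" = b := by
  rw [show (1:Int) = ((1:Nat):Int) from rfl, PySem.List.pyGetD_natCast]; rfl

theorem feat0 (wf : Nat → String) (t wp hv wa fi fm : Int) (y : String) :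
    feat_step ((List.range 7).map wf) (mk6 t wp hv wa fi fm) (((0:Nat) : Int), y) =
      mk6 t wp hv wa fi (fm + iteI (y ∈ pvFEATURES)) := by
  by_cases hm : y ∈ pvFEATURES
  · have hc : pvFEATURES.contains y = true := by simpa using hm
    simp only [feat_step, hc, if_true]
    norm_num
    rw [mk6_fm_mod]
    simp [iteI, hm]
  · have hc : pvFEATURES.contains y = false := by simpa using hm
    simp only [feat_step, hc]
    simp [iteI, hm]

theorem feat6 (wf : Nat → String) (t wp hv wa fi fm : Int) (y : String) :
    feat_step ((List.range 7).map wf) (mk6 t wp hv wa fi fm) (((6:Nat) : Int), y) =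
      mk6 t wp hv wa fi (fm + iteI (y ∈ pvFEATURES)) := by
  by_cases hm : y ∈ pvFEATURES
  · have hc : pvFEATURES.contains y = true := by simpa using hm
    simp only [feat_step, hc, if_true]
    norm_num
    rw [mk6_fm_mod]
    simp [iteI, hm]
  · have hc : pvFEATURES.contains y = false := by simpa using hm
    simp only [feat_step, hc]
    simp [iteI, hm]

theorem featMid (wf : Nat → String) (t wp hv wa fi fm : Int) (i : Nat) (h1 : 0 < i) (h2 : i < 6)
    (y : String) :
    feat_step ((List.range 7).map wf) (mk6 t wp hv wa fi fm) ((i : Int), y) =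
      mk6 t wp hv wa (fi + iteI (y ∈ pvFEATURES ∧ wf (i - 1) ≠ wf (i + 1)))
        (fm + iteI (y ∈ pvFEATURES ∧ wf (i - 1) = wf (i + 1))) := by
  have e1 : ((i : Int) - 1) = ((i - 1 : Nat) : Int) := by omega
  have e2 : ((i : Int) + 1) = ((i + 1 : Nat) : Int) := by omega
  have g1 : PySem.List.pyGetD ((List.range 7).map wf) ((i : Int) - 1) "" = wf (i - 1) := by
    rw [e1, PySem.List.pyGetD_natCast, PySem.List.getD_map_range _ _ _ _ (by omega)]
  have g2 : PySem.List.pyGetD ((List.range 7).map wf) ((i : Int) + 1) "" = wf (i + 1) := by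
    rw [e2, PySem.List.pyGetD_natCast, PySem.List.getD_map_range _ _ _ _ (by omega)]
  have hgt : ((i : Int) > 0) := by omega
  have hlt : ((i : Int) < ((((List.range 7).map wf).length : Int) - 1)) := by simp; omega
  by_cases hm : y ∈ pvFEATURES
  · have hc : pvFEATURES.contains y = true := by simpa using hm
    simp only [feat_step, hc, if_true, if_pos hgt, if_pos hlt, g1, g2,
      List.singleton_append, pyGetD_pair0, pyGetD_pair1, List.length_cons, List.length_nil]
    by_cases he : wf (i - 1) = wf (i + 1)
    · simp only [he, beq_self_eq_true, Bool.not_true, Bool.and_false, Bool.false_eq_true,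
        if_false, mk6_fm_mod]
      simp [iteI, hm, he]
    · have hb : (wf (i - 1) == wf (i + 1)) = false := by simpa using he
      simp only [hb, Bool.not_false, Bool.and_true, mk6_fi_mod]
      norm_num
      simp [iteI, hm, he]
  · have hc : pvFEATURES.contains y = false := by simpa using hm
    simp only [feat_step, hc]
    simp [iteI, hm]

theorem enum_window (wf : Nat → String) :
    PySem.List.enumerate ((List.range 7).map wf) 0 =
      [(((0:Nat) : Int), wf 0), (((1:Nat) : Int), wf 1), (((2:Nat) : Int), wf 2),
       (((3:Nat) : Int), wf 3), (((4:Nat) : Int), wf 4), (((5:Nat) : Int), wf 5),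
       (((6:Nat) : Int), wf 6)] := by
  norm_num [show (List.range 7) = [0,1,2,3,4,5,6] from by decide,
    PySem.List.enumerate_cons, PySem.List.enumerate_nil]

theorem arw_step_mk6 (reel : List String) (s : Nat) (t wp hv wa fi fm : Int) :
    arw_step reel (mk6 t wp hv wa fi fm) (s : Int) =
      mk6 t (wp + iteI (0 < winSum6 s (gAct reel)))
        (hv + (winSum6 s (gK reel "H1") + winSum6 s (gK reel "H2") + winSum6 s (gK reel "W")))
        (wa + winSum6 s (gK reel "W_adj"))
        (fi + winSum5 s (gIso reel))
        (fm + (gF reel s + winSum5 s (gMat reel) + gF reel (s + 6))) := by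
  have hl6 : ∀ i ∈ List.range 6, i + 1 < 7 := by decide
  set wf : Nat → String := fun k => rAt reel (s + k) with hwf
  have hw : get_window reel (s : Int) = (List.range 7).map wf := window_eq reel s
  have hpairs : count_adjacency_in_window ((List.range 7).map wf) =
      (List.range 6).foldl (fun (d : PySem.Dict String Int) (i : Nat) =>
        caw_step ((List.range 7).map wf) d (i : Int)) PySem.Dict.empty := pairs_eq_fold wf
  have hgetD : ∀ k : String, (count_adjacency_in_window ((List.range 7).map wf)).getD k 0 =
      winSum6 s (gK reel k) := by
    intro k
    rw [hpairs, fold_getD wf _ hl6, PySem.Dict.getD_empty]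
    simp only [winSum6, gK, zero_add]
    rfl
  have hsum : (0 < (count_adjacency_in_window ((List.range 7).map wf)).values.sum) =
      (0 < winSum6 s (gAct reel)) := by
    rw [hpairs]
    apply propext
    rw [fold_valsum_pos wf _ hl6]
    have : winSum6 s (gAct reel) =
        ((List.range 6).countP (fun i => decide (incK reel (s + i) ≠ none)) : Int) := by
      rw [winSum6]
      exact sum_iteI_eq_countP _ _
    rw [this]
    constructor
    · rintro ⟨i, hi, hne⟩
      have : 0 < (List.range 6).countP (fun i => decide (incK reel (s + i) ≠ none)) := by
        rw [List.countP_pos_iff]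
        exact ⟨i, hi, by simpa using hne⟩
      omega
    · intro hpos
      have : 0 < (List.range 6).countP (fun i => decide (incK reel (s + i) ≠ none)) := by omega
      rw [List.countP_pos_iff] at this
      obtain ⟨i, hi, hdec⟩ := this
      exact ⟨i, hi, by simpa using hdec⟩
  rw [arw_step]
  simp only [hw]
  simp only [gt_iff_lt, hsum, mk6_wp_mod]
  have hif : (if (0 < winSum6 s (gAct reel)) then mk6 t (wp + 1) hv wa fi fm
      else mk6 t wp hv wa fi fm) = mk6 t (wp + iteI (0 < winSum6 s (gAct reel))) hv wa fi fm := by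
    unfold iteI; split <;> simp
  rw [hif]
  simp only [pvHIGH_VALUE, List.foldl_cons, List.foldl_nil, hgetD, mk6_hv_mod, mk6_wa_mod]
  rw [enum_window wf]
  simp only [List.foldl_cons, List.foldl_nil]
  rw [feat0, featMid wf _ _ _ _ _ _ 1 (by omega) (by omega),
    featMid wf _ _ _ _ _ _ 2 (by omega) (by omega), featMid wf _ _ _ _ _ _ 3 (by omega) (by omega),
    featMid wf _ _ _ _ _ _ 4 (by omega) (by omega), featMid wf _ _ _ _ _ _ 5 (by omega) (by omega),
    feat6]
  norm_num
  simp only [hwf, winSum5, winSum6, gIso, gMat, gF, show (List.range 5) = [0,1,2,3,4] from by decide,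
    List.map_cons, List.map_nil, List.sum_cons, List.sum_nil]
  congr 1 <;> ring

theorem foldA (reel : List String) (l : List Nat) (t wp hv wa fi fm : Int) :
    (l.foldl (fun (st : PySem.Dict String Int) (s : Nat) => arw_step reel st (s : Int))
      (mk6 t wp hv wa fi fm)) =
    mk6 t (wp + (l.map (fun s => iteI (0 < winSum6 s (gAct reel)))).sum)
      (hv + (l.map (fun s => winSum6 s (gK reel "H1") + winSum6 s (gK reel "H2") +
        winSum6 s (gK reel "W"))).sum)
      (wa + (l.map (fun s => winSum6 s (gK reel "W_adj"))).sum)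
      (fi + (l.map (fun s => winSum5 s (gIso reel))).sum)
      (fm + (l.map (fun s => gF reel s + winSum5 s (gMat reel) + gF reel (s + 6))).sum) := by
  induction l generalizing wp hv wa fi fm with
  | nil => simp
  | cons a tl ih =>
    simp only [List.foldl_cons, List.map_cons, List.sum_cons]
    rw [arw_step_mk6, ih]
    congr 1 <;> ring

theorem A_closed (reel : List String) :
    analyze_reel_windows reel =
      (mk6 (reel.length : Int)
        (cnt reel.length (fun s => iteI (0 < winSum6 s (gAct reel))))
        (cnt reel.length (fun s => winSum6 s (gK reel "H1") + winSum6 s (gK reel "H2") +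
          winSum6 s (gK reel "W")))
        (cnt reel.length (fun s => winSum6 s (gK reel "W_adj")))
        (cnt reel.length (fun s => winSum5 s (gIso reel)))
        (cnt reel.length (fun s => gF reel s + winSum5 s (gMat reel) + gF reel (s + 6)))).items := by
  rw [analyze_reel_windows]
  rw [PySem.List.pyRange_zero_nat, List.foldl_map]
  rw [show (PySem.Dict.ofList
    [("total_windows", (reel.length : Int)), ("windows_with_pairs", (0:Int)), ("high_value_pairs", (0:Int)),
     ("wild_adjacent_to_symbol", (0:Int)), ("feature_isolated", (0:Int)), ("feature_with_matches", (0:Int))])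
    = mk6 (reel.length : Int) 0 0 0 0 0 from rfl]
  rw [foldA]
  simp only [zero_add]
  rfl

theorem cnt_finset (n : Nat) (g : Nat → Int) : cnt n g = ∑ x ∈ Finset.range n, g x := rfl

theorem cnt_add (n : Nat) (f g : Nat → Int) :
    cnt n (fun s => f s + g s) = cnt n f + cnt n g := by
  simpa [cnt] using PySem.List.sum_map_add_int (List.range n) f g

theorem cnt_congr (n : Nat) (f g : Nat → Int) (h : ∀ s < n, f s = g s) : cnt n f = cnt n g := by
  unfold cnt
  exact congrArg List.sum (List.map_congr_left (fun s hs => h s (List.mem_range.mp hs)))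

theorem cnt_shift1 (n : Nat) (g : Nat → Int) (hper : ∀ q, g (q + n) = g q) :
    cnt n (fun s => g (s + 1)) = cnt n g := by
  have h1 : ((List.range (n+1)).map g).sum = g 0 + ((List.range n).map (fun s => g (s + 1))).sum := by
    rw [List.range_succ_eq_map]
    simp [List.map_map, Function.comp_def, Nat.succ_eq_add_one]
  have h2 : ((List.range (n+1)).map g).sum = ((List.range n).map g).sum + g n := by
    rw [List.range_succ]
    simp
  have h3 : g n = g 0 := by simpa using hper 0
  unfold cnt
  omega
theorem cnt_shift (n : Nat) (g : Nat → Int) (hper : ∀ q, g (q + n) = g q) (i : Nat) :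
    cnt n (fun s => g (s + i)) = cnt n g := by
  induction i with
  | zero => simp
  | succ i ih =>
    have he : (fun s => g (s + (i + 1))) = (fun s => (fun q => g (q + i)) (s + 1)) := by
      funext s; congr 1; omega
    rw [he, cnt_shift1 n (fun q => g (q + i)) (fun q => by simp only []; rw [show q + n + i = (q + i) + n from by omega, hper])]
    have he2 : (fun s => g (s + i)) = (fun q => g (q + i)) := rfl
    rw [← he2] at ih ⊢
    exact ih

theorem cnt_winSum (n : Nat) (g : Nat → Int) (hper : ∀ q, g (q + n) = g q) (m : Nat) :
    cnt n (fun s => ((List.range m).map (fun i => g (s + i))).sum) = m * cnt n g := by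
  induction m with
  | zero => simp [cnt]
  | succ m ih =>
    have : (fun s => ((List.range (m+1)).map (fun i => g (s + i))).sum) =
        (fun s => ((List.range m).map (fun i => g (s + i))).sum + g (s + m)) := by
      funext s; rw [List.range_succ]; simp
    rw [this, cnt_add, ih, cnt_shift n g hper m]
    push_cast
    ring

theorem rAt_per (reel : List String) (q : Nat) : rAt reel (q + reel.length) = rAt reel q := by
  simp [rAt]
theorem rAt_mod (reel : List String) (q : Nat) : rAt reel (q % reel.length) = rAt reel q := by
  simp [rAt, Nat.mod_mod]
theorem rAt_lt (reel : List String) (p : Nat) (hp : p < reel.length) : rAt reel p = reel.getD p "" := by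
  simp [rAt, Nat.mod_eq_of_lt hp]
theorem rAt_mod_succ (reel : List String) (q : Nat) :
    rAt reel (q % reel.length + 1) = rAt reel (q + 1) := by
  unfold rAt
  rw [Nat.mod_add_mod]
theorem incK_mod (reel : List String) (q : Nat) : incK reel (q % reel.length) = incK reel q := by
  unfold incK
  rw [rAt_mod, rAt_mod_succ]

theorem mk6_items (t wp hv wa fi fm : Int) : (mk6 t wp hv wa fi fm).items =
    [("total_windows", t), ("windows_with_pairs", wp), ("high_value_pairs", hv),
     ("wild_adjacent_to_symbol", wa), ("feature_isolated", fi), ("feature_with_matches", fm)] := rfl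
theorem mk6_ins_hv (t wp hv wa fi fm v : Int) :
    (mk6 t wp hv wa fi fm).insert "high_value_pairs" v = mk6 t wp v wa fi fm := rfl
theorem mk6_ins_wa (t wp hv wa fi fm v : Int) :
    (mk6 t wp hv wa fi fm).insert "wild_adjacent_to_symbol" v = mk6 t wp hv v fi fm := rfl
theorem mk6_ins_fi (t wp hv wa fi fm v : Int) :
    (mk6 t wp hv wa fi fm).insert "feature_isolated" v = mk6 t wp hv wa v fm := rfl
theorem mk6_ins_fm (t wp hv wa fi fm v : Int) :
    (mk6 t wp hv wa fi fm).insert "feature_with_matches" v = mk6 t wp hv wa fi v := rfl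
theorem mk6_ins_wp (t wp hv wa fi fm v : Int) :
    (mk6 t wp hv wa fi fm).insert "windows_with_pairs" v = mk6 t v hv wa fi fm := rfl

theorem cnt_eq_countP (n : Nat) (c : Nat → Prop) [DecidablePred c] :
    cnt n (fun q => iteI (c q)) = ((List.range n).countP (fun q => decide (c q)) : Int) := by
  unfold cnt
  exact sum_iteI_eq_countP _ _

theorem reel_at (reel : List String) (p : Nat) (hp : p < reel.length) :
    PySem.List.pyGetD reel (p : Int) "" = rAt reel p := by
  rw [PySem.List.pyGetD_natCast]
  exact (rAt_lt reel p hp).symm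

theorem reel_at_succ (reel : List String) (p : Nat) :
    PySem.List.pyGetD reel (PySem.Int.mod ((p : Int) + 1) (reel.length : Int)) "" = rAt reel (p + 1) := by
  rw [show ((p : Int) + 1) = ((p + 1 : Nat) : Int) from by push_cast; ring,
    PySem.Int.mod_natCast, PySem.List.pyGetD_natCast]
  rfl

theorem reel_at_pred (reel : List String) (hn : 0 < reel.length) (p : Nat) (hp : p < reel.length) :
    PySem.List.pyGetD reel (PySem.Int.mod ((p : Int) - 1) (reel.length : Int)) "" =
      rAt reel (p + (reel.length - 1)) := by
  have hmod : PySem.Int.mod ((p : Int) - 1) (reel.length : Int) =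
      (((p + (reel.length - 1)) % reel.length : Nat) : Int) := by
    rcases Nat.eq_zero_or_pos p with hp0 | hp1
    · subst hp0
      have h1 : ((0 : Nat) : Int) - 1 = ((reel.length - 1 : Nat) : Int) + (reel.length : Int) * (-1) := by
        push_cast [Nat.cast_sub (by omega : 1 ≤ reel.length)]
        ring
      rw [h1, PySem.Int.mod_eq_emod_of_pos (by omega), Int.add_mul_emod_self_left,
        Int.emod_eq_of_lt (by omega) (by omega)]
      rw [Nat.zero_add, Nat.mod_eq_of_lt (by omega)]
    · rw [show ((p : Int) - 1) = ((p - 1 : Nat) : Int) from by omega, PySem.Int.mod_natCast]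
      congr 1
      have h2 : p + (reel.length - 1) = (p - 1) + reel.length := by omega
      rw [h2, Nat.add_mod_right, Nat.mod_eq_of_lt (by omega)]
  rw [hmod, PySem.List.pyGetD_natCast]
  rfl

theorem mk6_congr {t1 t2 wp1 wp2 hv1 hv2 wa1 wa2 fi1 fi2 fm1 fm2 : Int} (ht : t1 = t2)
    (hwp : wp1 = wp2) (hhv : hv1 = hv2) (hwa : wa1 = wa2) (hfi : fi1 = fi2) (hfm : fm1 = fm2) :
    mk6 t1 wp1 hv1 wa1 fi1 fm1 = mk6 t2 wp2 hv2 wa2 fi2 fm2 := by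
  subst ht hwp hhv hwa hfi hfm; rfl

theorem hws_aux (reel : List String) (s : Nat) :
    ((List.range 6).any (fun i => decide (incK reel (s + i) ≠ none))) =
      decide (0 < winSum6 s (gAct reel)) := by
  have hws : winSum6 s (gAct reel) =
      (((List.range 6).countP (fun i => decide (incK reel (s + i) ≠ none))) : Int) := by
    rw [winSum6]
    exact sum_iteI_eq_countP _ _
  rw [hws]
  cases h : (List.range 6).any (fun i => decide (incK reel (s + i) ≠ none)) with
  | false =>
    have h0 : (List.range 6).countP (fun i => decide (incK reel (s + i) ≠ none)) = 0 :=
      List.countP_eq_zero.mpr (fun a ha => by simpa using (List.any_eq_false.mp h) a ha)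
    symm
    rw [h0]
    norm_num
  | true =>
    obtain ⟨i, hi, hdec⟩ := List.any_eq_true.mp h
    have h0 : 0 < (List.range 6).countP (fun i => decide (incK reel (s + i) ≠ none)) :=
      List.countP_pos_iff.mpr ⟨i, hi, hdec⟩
    symm
    simp only [decide_eq_true_eq]
    omega

theorem B_closed (reel : List String) (hn : 0 < reel.length) :
    analyze_reel_windows_alt reel =
      (mk6 (reel.length : Int)
        (cnt reel.length (fun s => iteI (0 < winSum6 s (gAct reel))))
        (6 * cnt reel.length (fun p => iteI (rAt reel p = rAt reel (p + 1) ∧ rAt reel p ∈ pvHIGH_VALUE)))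
        (6 * cnt reel.length (fun p => iteI (¬ rAt reel p = rAt reel (p + 1) ∧
          (rAt reel p = "W" ∨ rAt reel (p + 1) = "W"))))
        (5 * cnt reel.length (fun p => iteI (rAt reel p ∈ pvFEATURES ∧
          ¬ rAt reel (p + (reel.length - 1)) = rAt reel (p + 1))))
        (5 * (cnt reel.length (fun p => iteI (rAt reel p ∈ pvFEATURES)) -
            cnt reel.length (fun p => iteI (rAt reel p ∈ pvFEATURES ∧
              ¬ rAt reel (p + (reel.length - 1)) = rAt reel (p + 1)))) +
          2 * cnt reel.length (fun p => iteI (rAt reel p ∈ pvFEATURES)))).items := by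
  have hc0 : (((reel.length : Int)) == 0) = false := by
    simp only [beq_eq_false_iff_ne, ne_eq]
    omega
  rw [analyze_reel_windows_alt]
  simp only [hc0, Bool.false_eq_true, if_false, PySem.List.pyRange_zero_nat, List.map_map]
  rw [show (PySem.Dict.ofList
    [("total_windows", (reel.length : Int)), ("windows_with_pairs", (0:Int)), ("high_value_pairs", (0:Int)),
     ("wild_adjacent_to_symbol", (0:Int)), ("feature_isolated", (0:Int)), ("feature_with_matches", (0:Int))])
    = mk6 (reel.length : Int) 0 0 0 0 0 from rfl]
  rw [mk6_ins_hv, mk6_ins_wa, mk6_ins_fi, mk6_ins_fm, mk6_ins_wp]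
  have hmem : ∀ p ∈ List.range reel.length, p < reel.length := fun p hp => List.mem_range.mp hp
  have heqL : (List.range reel.length).map ((fun p => PySem.List.pyGetD reel p "" ==
        PySem.List.pyGetD reel (PySem.Int.mod (p + 1) (reel.length : Int)) "") ∘ (fun k : Nat => (k : Int))) =
      (List.range reel.length).map (fun p => rAt reel p == rAt reel (p + 1)) := by
    refine List.map_congr_left (fun p hp => ?_)
    simp only [Function.comp_apply]
    rw [reel_at reel p (hmem p hp), reel_at_succ]
  rw [heqL]
  have hwildL : (List.range reel.length).map ((fun p =>
        !PySem.List.pyGetD ((List.range reel.length).map (fun p => rAt reel p == rAt reel (p + 1))) p false &&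
          (PySem.List.pyGetD reel p "" == "W" ||
            PySem.List.pyGetD reel (PySem.Int.mod (p + 1) (reel.length : Int)) "" == "W")) ∘
        (fun k : Nat => (k : Int))) =
      (List.range reel.length).map (fun p =>
        !(rAt reel p == rAt reel (p + 1)) && ((rAt reel p == "W") || (rAt reel (p + 1) == "W"))) := by
    refine List.map_congr_left (fun p hp => ?_)
    simp only [Function.comp_apply]
    rw [PySem.List.pyGetD_natCast, PySem.List.getD_map_range _ _ _ _ (hmem p hp),
      reel_at reel p (hmem p hp), reel_at_succ]
  rw [hwildL]
  have hactiveL : (List.range reel.length).map ((fun p =>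
        PySem.List.pyGetD ((List.range reel.length).map (fun p => rAt reel p == rAt reel (p + 1))) p false ||
          PySem.List.pyGetD ((List.range reel.length).map (fun p =>
            !(rAt reel p == rAt reel (p + 1)) && ((rAt reel p == "W") || (rAt reel (p + 1) == "W")))) p false) ∘
        (fun k : Nat => (k : Int))) =
      (List.range reel.length).map (fun p => decide (incK reel p ≠ none)) := by
    refine List.map_congr_left (fun p hp => ?_)
    simp only [Function.comp_apply]
    rw [PySem.List.pyGetD_natCast, PySem.List.getD_map_range _ _ _ _ (hmem p hp),
      PySem.List.pyGetD_natCast, PySem.List.getD_map_range _ _ _ _ (hmem p hp)]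
    by_cases h1 : rAt reel p = rAt reel (p + 1) <;>
      by_cases h2 : rAt reel p = "W" ∨ rAt reel (p + 1) = "W" <;>
        simp [incK, h1, h2] <;> tauto
  rw [hactiveL]
  refine congrArg PySem.Dict.items (mk6_congr rfl ?_ ?_ ?_ ?_ ?_)
  · -- windows_with_pairs
    rw [List.countP_map, cnt_eq_countP]
    refine congrArg _ (List.countP_congr (fun s hs => ?_))
    simp only [Function.comp_apply]
    rw [show PySem.List.pyRange 0 6 1 = (List.range 6).map (fun k : Nat => (k : Int)) from by decide,
      List.any_map]
    have hj : ∀ i ∈ List.range 6,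
        ((fun j => PySem.List.pyGetD ((List.range reel.length).map
          (fun p => decide (incK reel p ≠ none))) (PySem.Int.mod ((s : Int) + j) (reel.length : Int)) false) ∘
          (fun k : Nat => (k : Int))) i = decide (incK reel (s + i) ≠ none) := by
      intro i hi
      simp only [Function.comp_apply]
      rw [show ((s : Int) + (i : Nat)) = ((s + i : Nat) : Int) from by push_cast; ring,
        PySem.Int.mod_natCast, PySem.List.pyGetD_natCast,
        PySem.List.getD_map_range _ _ _ _ (Nat.mod_lt _ hn), incK_mod]
    rw [PySem.List.any_congr_mem hj, hws_aux reel s]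
  · -- high_value_pairs
    rw [List.countP_map, cnt_eq_countP]
    refine congrArg (fun m : Nat => 6 * (m : Int)) (List.countP_congr (fun p hp => ?_))
    simp only [Function.comp_apply]
    rw [PySem.List.pyGetD_natCast, PySem.List.getD_map_range _ _ _ _ (hmem p hp),
      reel_at reel p (hmem p hp)]
    by_cases h1 : rAt reel p = rAt reel (p + 1) <;>
      by_cases h2 : rAt reel p ∈ pvHIGH_VALUE <;>
        simp [pvHIGH_VALUE, h1, h2] <;> simp [pvHIGH_VALUE] at h2 <;> tauto
  · -- wild_adjacent_to_symbol
    rw [List.countP_map, cnt_eq_countP]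
    refine congrArg (fun m : Nat => 6 * (m : Int)) (List.countP_congr (fun p hp => ?_))
    simp only [Function.comp_apply]
    rw [PySem.List.pyGetD_natCast, PySem.List.getD_map_range _ _ _ _ (hmem p hp)]
    by_cases h1 : rAt reel p = rAt reel (p + 1) <;>
      by_cases h2 : rAt reel p = "W" ∨ rAt reel (p + 1) = "W" <;>
        simp [h1, h2] <;> tauto
  · -- feature_isolated
    rw [List.countP_filter, List.countP_map, cnt_eq_countP]
    refine congrArg (fun m : Nat => 5 * (m : Int)) (List.countP_congr (fun p hp => ?_))
    simp only [Function.comp_apply]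
    rw [reel_at_pred reel hn p (hmem p hp), reel_at_succ, reel_at reel p (hmem p hp)]
    by_cases hm : rAt reel p ∈ pvFEATURES <;>
      by_cases hs2 : rAt reel (p + (reel.length - 1)) = rAt reel (p + 1) <;>
        simp [pvFEATURES, hm, hs2] <;> simp [pvFEATURES] at hm <;> tauto
  · -- feature_with_matches
    have hlenEq : List.countP ((fun p => ["P", "B", "T"].contains (PySem.List.pyGetD reel p "")) ∘
        (fun k : Nat => (k : Int))) (List.range reel.length) =
        List.countP (fun q => decide (rAt reel q ∈ pvFEATURES)) (List.range reel.length) := by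
      refine List.countP_congr (fun p hp => ?_)
      simp only [Function.comp_apply]
      rw [reel_at reel p (hmem p hp)]
      by_cases hm : rAt reel p ∈ pvFEATURES <;>
        simp [pvFEATURES, hm] <;> simp [pvFEATURES] at hm <;> tauto
    have hisoEq : List.countP ((fun p =>
        !(PySem.List.pyGetD reel (PySem.Int.mod (p - 1) (reel.length : Int)) "" ==
          PySem.List.pyGetD reel (PySem.Int.mod (p + 1) (reel.length : Int)) "") &&
        ["P", "B", "T"].contains (PySem.List.pyGetD reel p "")) ∘
        (fun k : Nat => (k : Int))) (List.range reel.length) =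
        List.countP (fun q => decide (rAt reel q ∈ pvFEATURES ∧
          ¬ rAt reel (q + (reel.length - 1)) = rAt reel (q + 1))) (List.range reel.length) := by
      refine List.countP_congr (fun p hp => ?_)
      simp only [Function.comp_apply]
      rw [reel_at_pred reel hn p (hmem p hp), reel_at_succ, reel_at reel p (hmem p hp)]
      by_cases hm : rAt reel p ∈ pvFEATURES <;>
        by_cases hs2 : rAt reel (p + (reel.length - 1)) = rAt reel (p + 1) <;>
          simp [pvFEATURES, hm, hs2] <;> simp [pvFEATURES] at hm <;> tauto
    rw [← List.countP_eq_length_filter, List.countP_filter, List.countP_map, List.countP_map,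
      hlenEq, hisoEq, cnt_eq_countP, cnt_eq_countP]


theorem iteI_congr {c1 c2 : Prop} [Decidable c1] [Decidable c2] (h : c1 ↔ c2) :
    iteI c1 = iteI c2 := by
  unfold iteI
  split_ifs with h1 h2 <;> tauto

theorem incK_per (reel : List String) (q : Nat) : incK reel (q + reel.length) = incK reel q := by
  unfold incK
  rw [rAt_per, show q + reel.length + 1 = (q + 1) + reel.length from by omega, rAt_per]
theorem gK_per (reel : List String) (k : String) (q : Nat) :
    gK reel k (q + reel.length) = gK reel k q := by unfold gK; rw [incK_per]
theorem gIso_per (reel : List String) (q : Nat) : gIso reel (q + reel.length) = gIso reel q := by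
  unfold gIso
  rw [show q + reel.length + 1 = (q + 1) + reel.length from by omega, rAt_per, rAt_per,
    show q + reel.length + 2 = (q + 2) + reel.length from by omega, rAt_per]
theorem gMat_per (reel : List String) (q : Nat) : gMat reel (q + reel.length) = gMat reel q := by
  unfold gMat
  rw [show q + reel.length + 1 = (q + 1) + reel.length from by omega, rAt_per, rAt_per,
    show q + reel.length + 2 = (q + 2) + reel.length from by omega, rAt_per]
theorem gF_per (reel : List String) (q : Nat) : gF reel (q + reel.length) = gF reel q := by
  unfold gF; rw [rAt_per]

theorem cnt_winSum6 (reel : List String) (g : Nat → Int) (hper : ∀ q, g (q + reel.length) = g q) :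
    cnt reel.length (fun s => winSum6 s g) = 6 * cnt reel.length g := by
  have : (fun s => winSum6 s g) = (fun s => ((List.range 6).map (fun i => g (s + i))).sum) := rfl
  rw [this, cnt_winSum reel.length g hper 6]
  norm_num
theorem cnt_winSum5 (reel : List String) (g : Nat → Int) (hper : ∀ q, g (q + reel.length) = g q) :
    cnt reel.length (fun s => winSum5 s g) = 5 * cnt reel.length g := by
  have : (fun s => winSum5 s g) = (fun s => ((List.range 5).map (fun i => g (s + i))).sum) := rfl
  rw [this, cnt_winSum reel.length g hper 5]
  norm_num

-- pointwise: the three HIGH_VALUE lookups sum to the single B-side indicator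
theorem hv_pointwise (reel : List String) (p : Nat) :
    gK reel "H1" p + gK reel "H2" p + gK reel "W" p =
      iteI (rAt reel p = rAt reel (p + 1) ∧ rAt reel p ∈ pvHIGH_VALUE) := by
  unfold gK incK
  by_cases heq : rAt reel p = rAt reel (p + 1)
  · simp only [heq, if_pos rfl]
    by_cases h1 : rAt reel (p+1) = "H1" <;> by_cases h2 : rAt reel (p+1) = "H2" <;>
      by_cases h3 : rAt reel (p+1) = "W" <;>
        simp_all [iteI, pvHIGH_VALUE, heq]
  · rw [if_neg heq]
    by_cases hw : rAt reel p = "W" ∨ rAt reel (p + 1) = "W" <;>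
      simp [iteI, hw, heq]
-- pointwise: gMat + gIso = shifted feature indicator
theorem mat_iso_pointwise (reel : List String) (q : Nat) :
    gMat reel q + gIso reel q = gF reel (q + 1) := by
  unfold gMat gIso gF
  by_cases hm : rAt reel (q + 1) ∈ pvFEATURES <;>
    by_cases he : rAt reel q = rAt reel (q + 2) <;> simp [iteI, hm, he]

theorem iso_shift (reel : List String) (hn : 0 < reel.length) :
    cnt reel.length (fun p => iteI (rAt reel p ∈ pvFEATURES ∧
      ¬ rAt reel (p + (reel.length - 1)) = rAt reel (p + 1))) = cnt reel.length (gIso reel) := by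
  have hper : ∀ q, (fun p => iteI (rAt reel p ∈ pvFEATURES ∧
      ¬ rAt reel (p + (reel.length - 1)) = rAt reel (p + 1))) (q + reel.length) =
      (fun p => iteI (rAt reel p ∈ pvFEATURES ∧
      ¬ rAt reel (p + (reel.length - 1)) = rAt reel (p + 1))) q := by
    intro q
    dsimp only
    refine iteI_congr ?_
    rw [rAt_per, show q + reel.length + (reel.length - 1) = (q + (reel.length - 1)) + reel.length from by omega,
      rAt_per, show q + reel.length + 1 = (q + 1) + reel.length from by omega, rAt_per]
  rw [← cnt_shift1 reel.length _ hper]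
  refine cnt_congr _ _ _ (fun s _ => ?_)
  dsimp only
  unfold gIso
  refine iteI_congr ?_
  rw [show s + 1 + (reel.length - 1) = s + reel.length from by omega, rAt_per]

theorem gF_shift (reel : List String) : cnt reel.length (fun q => gF reel (q + 1)) = cnt reel.length (gF reel) :=
  cnt_shift1 reel.length (gF reel) (gF_per reel)

theorem AB_eq (reel : List String) (hD : ¬ D_analyze_reel_windows reel) :
    analyze_reel_windows reel = analyze_reel_windows_alt reel := by
  rcases Nat.eq_zero_or_pos reel.length with h0 | hn
  · have : reel = [] := List.length_eq_zero_iff.mp h0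
    subst this
    decide
  · rw [A_closed, B_closed reel hn]
    refine congrArg PySem.Dict.items (mk6_congr rfl rfl ?_ ?_ ?_ ?_)
    · -- hv
      rw [cnt_add reel.length (fun s => winSum6 s (gK reel "H1") + winSum6 s (gK reel "H2"))
          (fun s => winSum6 s (gK reel "W")),
        cnt_add reel.length (fun s => winSum6 s (gK reel "H1")) (fun s => winSum6 s (gK reel "H2")),
        cnt_winSum6 reel _ (gK_per reel "H1"), cnt_winSum6 reel _ (gK_per reel "H2"),
        cnt_winSum6 reel _ (gK_per reel "W")]
      have h : cnt reel.length (gK reel "H1") + cnt reel.length (gK reel "H2") +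
          cnt reel.length (gK reel "W") =
          cnt reel.length (fun p => iteI (rAt reel p = rAt reel (p + 1) ∧ rAt reel p ∈ pvHIGH_VALUE)) := by
        rw [← cnt_congr reel.length _ _ (fun p _ => hv_pointwise reel p),
          cnt_add reel.length (fun p => gK reel "H1" p + gK reel "H2" p) (fun p => gK reel "W" p),
          cnt_add reel.length (fun p => gK reel "H1" p) (fun p => gK reel "H2" p)]
      rw [← h]
      ring
    · -- wa
      rw [cnt_winSum6 reel _ (gK_per reel "W_adj")]
      have hnd : ∀ p, p < reel.length → ¬(rAt reel p = "W_adj" ∧ rAt reel (p + 1) = "W_adj") := by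
        intro p hp hcon
        refine hD ⟨p, List.mem_range.mpr hp, ?_, hcon.2⟩
        rw [← rAt_lt reel p hp]
        exact hcon.1
      have h : cnt reel.length (gK reel "W_adj") =
          cnt reel.length (fun p => iteI (¬ rAt reel p = rAt reel (p + 1) ∧
            (rAt reel p = "W" ∨ rAt reel (p + 1) = "W"))) := by
        refine cnt_congr _ _ _ (fun p hp => ?_)
        unfold gK incK
        by_cases heq : rAt reel p = rAt reel (p + 1)
        · rw [if_pos heq]
          by_cases hwadj : rAt reel p = "W_adj"
          · exact absurd ⟨hwadj, heq ▸ hwadj⟩ (hnd p hp)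
          · have hw1 : ¬ rAt reel (p + 1) = "W_adj" := heq ▸ hwadj
            simp [iteI, hw1, heq]
        · rw [if_neg heq]
          by_cases hw : rAt reel p = "W" ∨ rAt reel (p + 1) = "W" <;> simp [iteI, hw, heq]
      rw [h]
    · -- fi
      rw [cnt_winSum5 reel _ (gIso_per reel), iso_shift reel hn]
    · -- fm
      rw [cnt_add reel.length (fun s => gF reel s + winSum5 s (gMat reel))
          (fun s => gF reel (s + 6)),
        cnt_add reel.length (fun s => gF reel s) (fun s => winSum5 s (gMat reel)),
        cnt_winSum5 reel _ (gMat_per reel), cnt_shift reel.length (gF reel) (gF_per reel) 6,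
        iso_shift reel hn]
      have h : cnt reel.length (fun q => gMat reel q + gIso reel q) =
          cnt reel.length (fun q => gF reel (q + 1)) :=
        cnt_congr _ _ _ (fun q _ => mat_iso_pointwise reel q)
      rw [cnt_add reel.length (gMat reel) (gIso reel), gF_shift reel] at h
      have hc : cnt reel.length (fun s => gF reel s) = cnt reel.length (gF reel) := rfl
      have hFF : cnt reel.length (gF reel) =
          cnt reel.length (fun p => iteI (rAt reel p ∈ pvFEATURES)) := rfl
      rw [hc]
      omega

theorem AB_ne (reel : List String) (hd : D_analyze_reel_windows reel) :
    analyze_reel_windows reel ≠ analyze_reel_windows_alt reel := by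
  obtain ⟨p0, hp0mem, h1, h2⟩ := hd
  have hp0 : p0 < reel.length := List.mem_range.mp hp0mem
  have hn : 0 < reel.length := by omega
  have hr1 : rAt reel p0 = "W_adj" := by rw [rAt_lt reel p0 hp0]; exact h1
  have hr2 : rAt reel (p0 + 1) = "W_adj" := h2
  rw [A_closed, B_closed reel hn]
  intro heq
  simp only [mk6_items, List.cons.injEq, Prod.mk.injEq, and_true, true_and] at heq
  obtain ⟨-, hwaeq, -⟩ := heq
  rw [cnt_winSum6 reel _ (gK_per reel "W_adj")] at hwaeq
  have hlt : cnt reel.length (fun p => iteI (¬ rAt reel p = rAt reel (p + 1) ∧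
      (rAt reel p = "W" ∨ rAt reel (p + 1) = "W"))) < cnt reel.length (gK reel "W_adj") := by
    rw [cnt_finset, cnt_finset]
    refine Finset.sum_lt_sum (fun i _ => ?_) ⟨p0, Finset.mem_range.mpr hp0, ?_⟩
    · unfold gK incK iteI
      split_ifs <;> first | omega | tauto | simp_all
    · unfold gK incK
      have heqp : rAt reel p0 = rAt reel (p0 + 1) := by rw [hr1, hr2]
      rw [if_pos heqp, hr1]
      simp [iteI, hr1, hr2]
  omega

-- ===== VERDICT (by name: the statement is the Claim_ definition above) =====
theorem analyze_reel_windows_spec : Claim_unchanged_analyze_reel_windows := by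
  intro reel _ hD
  exact AB_eq reel hD
theorem analyze_reel_windows_changed : Claim_changed_analyze_reel_windows := by
  unfold Claim_changed_analyze_reel_windows; decide
theorem analyze_reel_windows_tight : Claim_exact_analyze_reel_windows := by
  intro reel _ hd
  exact AB_ne reel hd
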